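-- pv_equiv track=rewrite | github.com/nate-hart-di/auto-sbm | scripts/cross_check_csv_db.py | find_prefix_matches
-- ===== SOURCE A (Python) =====
-- def find_prefix_matches(csv_slugs: dict, db_slugs: dict) -> dict:
--     """Find DB slugs that start with truncated CSV slugs."""
--     matches = {}  # csv_slug -> db_slug
--
--     for csv_slug in csv_slugs:
--         # Exact match first
--         if csv_slug in db_slugs:
--             matches[csv_slug] = csv_slug
--         else:
--             # Find DB slugs that start with the CSV slug (truncated match)
--             for db_slug in db_slugs:
--                 if db_slug.startswith(csv_slug):
--                     matches[csv_slug] = db_slug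
--                     break
--
--     return matches
-- ===== SOURCE B (Python) =====
-- def find_prefix_matches(csv_slugs: dict, db_slugs: dict) -> dict:
--     """Find DB slugs that start with truncated CSV slugs."""
--     # One preprocessing pass builds a resolution table: every prefix of every
--     # db_slug maps to the FIRST db_slug carrying it (setdefault keeps the
--     # first), and then every full db_slug is forced to map to itself, so exact
--     # matches win.  Each csv_slug is then answered by a single dict lookup,
--     # and the result is assembled as one comprehension.
--     resolve = {}
--     for db_slug in db_slugs:
--         for i in range(len(db_slug) + 1):
--             resolve.setdefault(db_slug[:i], db_slug)
--     for db_slug in db_slugs: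
--         resolve[db_slug] = db_slug
--     return {csv_slug: resolve[csv_slug] for csv_slug in csv_slugs if csv_slug in resolve}
-- ===== Notes on version B (the rewrite author's own statement) =====
-- stated objective: faster
-- what changed: Instead of scanning all db_slugs for each csv_slug, B builds one resolution dict in a preprocessing pass (every prefix of every db_slug mapped to its first carrier, then full db_slugs overwritten to map to themselves so exact matches win) and assembles the result as a single comprehension of O(1) lookups.
import Mathlib
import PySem

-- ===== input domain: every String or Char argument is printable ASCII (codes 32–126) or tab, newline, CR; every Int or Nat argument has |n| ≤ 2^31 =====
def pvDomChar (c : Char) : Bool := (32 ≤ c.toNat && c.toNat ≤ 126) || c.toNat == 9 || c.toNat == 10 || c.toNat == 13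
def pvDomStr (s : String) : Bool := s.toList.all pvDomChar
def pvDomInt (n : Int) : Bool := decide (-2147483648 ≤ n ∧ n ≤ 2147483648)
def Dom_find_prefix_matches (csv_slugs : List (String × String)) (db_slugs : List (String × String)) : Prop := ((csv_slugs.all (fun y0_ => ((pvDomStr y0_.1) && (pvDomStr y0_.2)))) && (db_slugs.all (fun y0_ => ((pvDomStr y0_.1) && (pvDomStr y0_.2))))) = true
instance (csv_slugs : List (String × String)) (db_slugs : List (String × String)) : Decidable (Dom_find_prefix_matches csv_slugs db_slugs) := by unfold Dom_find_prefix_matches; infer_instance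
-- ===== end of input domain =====

-- B replaces A's per-csv_slug scan over all db_slugs by one preprocessing pass building a
-- resolution table (every prefix of every db_slug -> first carrier, full db_slugs forced to
-- themselves), then assembles the result as a single comprehension of lookups.


-- ===== PORT A =====
-- dict parameters: only the keys are read; iteration over a dict = its distinct keys
-- in first-insertion order = PySem.List.dedup of the key list.
def find_prefix_matches (csv_slugs : List (String × String)) (db_slugs : List (String × String)) : List (String × String) :=
  let dbKeys := PySem.List.dedup (db_slugs.map Prod.fst)
  ((PySem.List.dedup (csv_slugs.map Prod.fst)).foldl
    (fun (m : PySem.Dict String String) csv_slug =>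
      if dbKeys.contains csv_slug then
        m.insert csv_slug csv_slug
      else
        -- 'for db_slug in db_slugs: if db_slug.startswith(csv_slug): …; break' = first hit
        match dbKeys.find? (fun db_slug => PySem.Str.startswith db_slug csv_slug) with
        | some db_slug => m.insert csv_slug db_slug
        | none => m)
    PySem.Dict.empty).items

-- ===== PORT B =====
def find_prefix_matches_alt (csv_slugs : List (String × String)) (db_slugs : List (String × String)) : List (String × String) :=
  let dbKeys := PySem.List.dedup (db_slugs.map Prod.fst)
  -- resolve.setdefault(db_slug[:i], db_slug) for i in range(len(db_slug)+1)
  let resolve0 : PySem.Dict String String := dbKeys.foldl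
    (fun fp db_slug =>
      (PySem.List.pyRange 0 (PySem.Str.len db_slug + 1) 1).foldl
        (fun fp i => fp.setdefault (PySem.Str.slice db_slug none (some i)) db_slug) fp)
    PySem.Dict.empty
  -- resolve[db_slug] = db_slug for every db_slug: exact matches win
  let resolve : PySem.Dict String String := dbKeys.foldl
    (fun fp db_slug => fp.insert db_slug db_slug) resolve0
  -- {csv_slug: resolve[csv_slug] for csv_slug in csv_slugs if csv_slug in resolve}
  -- (the csv keys are distinct after dedup, so the comprehension's items are this filterMap)
  (PySem.List.dedup (csv_slugs.map Prod.fst)).filterMap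
    (fun csv_slug => (resolve.get? csv_slug).map (fun v => (csv_slug, v)))

-- ===== PRECONDITION & SPEC =====
def Spec_find_prefix_matches (csv_slugs : List (String × String)) (db_slugs : List (String × String)) (out : List (String × String)) : Prop := out = find_prefix_matches_alt csv_slugs db_slugs
instance (csv_slugs : List (String × String)) (db_slugs : List (String × String)) (out : List (String × String)) : Decidable (Spec_find_prefix_matches csv_slugs db_slugs out) := by unfold Spec_find_prefix_matches; infer_instance

-- ===== CLAIM =====
def Claim_equal_find_prefix_matches : Prop := ∀ (csv_slugs : List (String × String)) (db_slugs : List (String × String)), Dom_find_prefix_matches csv_slugs db_slugs → Spec_find_prefix_matches csv_slugs db_slugs (find_prefix_matches csv_slugs db_slugs)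

-- ===== LEMMAS AND PROOFS =====

-- A fold of setdefaults with one fixed value: earliest entry wins, keys in ps fall back to v.
theorem get?_foldl_setdefault (ps : List String) (v : String)
    (fp : PySem.Dict String String) (c : String) :
    (ps.foldl (fun fp p => fp.setdefault p v) fp).get? c
      = (fp.get? c).or (if c ∈ ps then some v else none) := by
  induction ps generalizing fp with
  | nil => simp
  | cons p ps ih =>
    simp only [List.foldl_cons, ih]
    by_cases hc : c = p
    · subst hc
      rw [PySem.Dict.get?_setdefault_self]
      have h1 : some ((fp.get? c).getD v) = (fp.get? c).or (some v) := by
        cases fp.get? c <;> rfl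
      rw [h1, Option.or_assoc, if_pos (List.mem_cons_self)]
      rw [Option.some_or]
    · rw [PySem.Dict.get?_setdefault_of_ne _ _ hc]
      simp [hc]

-- Membership of c among the slices db_slug[:i], i = 0 … len, is exactly startswith.
theorem mem_slices_iff (d c : String) :
    (c ∈ (PySem.List.pyRange 0 (PySem.Str.len d + 1) 1).map
        (fun i => PySem.Str.slice d none (some i)))
      ↔ PySem.Str.startswith d c = true := by
  rw [PySem.Str.startswith_eq]
  unfold PySem.Chars.startswith
  rw [List.isPrefixOf_iff_prefix]
  constructor
  · intro h
    rcases List.mem_map.mp h with ⟨i, hi, hslice⟩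
    rcases PySem.List.mem_pyRange_one.mp hi with ⟨hi0, _⟩
    have hsl : (PySem.Str.slice d none (some i)).toList = List.take i.toNat d.toList := by
      rw [PySem.Str.toList_slice]
      unfold PySem.Chars.slice
      rw [PySem.List.slice_to _ hi0]
    rw [← hslice, hsl]
    exact List.take_prefix _ _
  · intro h
    refine List.mem_map.mpr ⟨(c.toList.length : Int), ?_, ?_⟩
    · refine PySem.List.mem_pyRange_one.mpr ⟨Int.natCast_nonneg _, ?_⟩
      have hlen : c.toList.length ≤ d.toList.length := h.length_le
      rw [PySem.Str.len_eq]
      omega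
    · apply String.toList_inj.mp
      rw [PySem.Str.toList_slice]
      unfold PySem.Chars.slice
      rw [PySem.List.slice_to _ (Int.natCast_nonneg _), Int.toNat_natCast]
      exact (List.prefix_iff_eq_take.mp h).symm

-- After the whole prefix-seeding fold, looking up c is the first db key with prefix c.
theorem get?_resolve0 (ds : List String) (fp : PySem.Dict String String) (c : String) :
    (ds.foldl
        (fun fp db_slug =>
          (PySem.List.pyRange 0 (PySem.Str.len db_slug + 1) 1).foldl
            (fun fp i => fp.setdefault (PySem.Str.slice db_slug none (some i)) db_slug) fp)
        fp).get? c
      = (fp.get? c).or (ds.find? (fun db_slug => PySem.Str.startswith db_slug c)) := by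
  induction ds generalizing fp with
  | nil => simp
  | cons d ds ih =>
    simp only [List.foldl_cons, ih]
    have hinner :
        ((PySem.List.pyRange 0 (PySem.Str.len d + 1) 1).foldl
            (fun fp i => fp.setdefault (PySem.Str.slice d none (some i)) d) fp).get? c
          = (fp.get? c).or (if PySem.Str.startswith d c then some d else none) := by
      rw [← List.foldl_map (f := fun i => PySem.Str.slice d none (some i))
            (g := fun fp p => PySem.Dict.setdefault fp p d),
          get?_foldl_setdefault]
      exact congrArg _ (if_congr (mem_slices_iff d c) rfl rfl)
    rw [hinner, Option.or_assoc, List.find?_cons]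
    cases hs : PySem.Str.startswith d c <;> simp

-- The self-insertion pass: a key in ds resolves to itself, anything else is untouched.
theorem get?_foldl_insert_self (ds : List String) (fp : PySem.Dict String String) (c : String) :
    (ds.foldl (fun fp d => fp.insert d d) fp).get? c
      = if c ∈ ds then some c else fp.get? c := by
  induction ds generalizing fp with
  | nil => simp
  | cons d ds ih =>
    simp only [List.foldl_cons, ih]
    by_cases hds : c ∈ ds
    · simp [hds]
    · by_cases hd : c = d
      · subst hd; simp [hds, PySem.Dict.get?_insert_self]
      · simp [hds, hd, PySem.Dict.get?_insert_of_ne _ _ hd]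

-- A conditional-insert fold over fresh distinct keys lists its hits in order.
theorem items_foldl_insert_option (f : String → Option String)
    (cs : List String) (m : PySem.Dict String String)
    (hnd : cs.Nodup) (hfresh : ∀ c ∈ cs, c ∉ m.keys) :
    (cs.foldl
        (fun m c => match f c with | some v => m.insert c v | none => m) m).items
      = m.items ++ cs.filterMap (fun c => (f c).map (fun v => (c, v))) := by
  induction cs generalizing m with
  | nil => simp
  | cons c cs ih =>
    rcases List.nodup_cons.mp hnd with ⟨hc, hnd'⟩
    have hcm : c ∉ m.keys := hfresh c List.mem_cons_self
    simp only [List.foldl_cons, List.filterMap_cons]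
    cases hf : f c with
    | none =>
      rw [ih m hnd' (fun x hx => hfresh x (List.mem_cons_of_mem _ hx))]
      rfl
    | some v =>
      have hnotc : m.contains c = false := by
        rw [Bool.eq_false_iff]
        intro hcon
        exact hcm ((PySem.Dict.contains_iff_mem_keys m c).mp hcon)
      rw [ih (m.insert c v) hnd' ?_]
      · rw [PySem.Dict.items_insert_of_not_contains m v hnotc]
        simp
      · intro x hx
        rw [PySem.Dict.keys_insert_of_not_contains m v hnotc]
        intro hmem
        rcases List.mem_append.mp hmem with h | h
        · exact hfresh x (List.mem_cons_of_mem _ hx) h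
        · rcases List.mem_singleton.mp h with rfl
          exact hc hx

-- ===== VERDICT =====
theorem find_prefix_matches_spec : Claim_equal_find_prefix_matches := by
  intro csv_slugs db_slugs _
  show _ = _
  unfold find_prefix_matches find_prefix_matches_alt
  simp only
  set dbKeys := PySem.List.dedup (db_slugs.map Prod.fst) with hdb
  set f : String → Option String := fun c =>
    if c ∈ dbKeys then some c
    else dbKeys.find? (fun db_slug => PySem.Str.startswith db_slug c) with hf
  have hres : ∀ c,
      ((dbKeys.foldl (fun fp d => fp.insert d d)
        (dbKeys.foldl
          (fun fp db_slug =>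
            (PySem.List.pyRange 0 (PySem.Str.len db_slug + 1) 1).foldl
              (fun fp i => fp.setdefault (PySem.Str.slice db_slug none (some i)) db_slug) fp)
          PySem.Dict.empty)).get? c) = f c := by
    intro c
    rw [get?_foldl_insert_self, get?_resolve0, PySem.Dict.get?_empty, Option.none_or, hf]
  have hstep :
      (fun (m : PySem.Dict String String) csv_slug =>
        if dbKeys.contains csv_slug then m.insert csv_slug csv_slug
        else
          match dbKeys.find? (fun db_slug => PySem.Str.startswith db_slug csv_slug) with
          | some db_slug => m.insert csv_slug db_slug
          | none => m)
      = (fun (m : PySem.Dict String String) c =>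
          match f c with | some v => m.insert c v | none => m) := by
    funext m c
    by_cases hc : c ∈ dbKeys
    · simp [hf, hc]
    · have hcon : dbKeys.contains c = false := by
        simp [List.contains_eq_mem, hc]
      simp only [hf, hc, if_false, hcon, Bool.false_eq_true]
  rw [hstep,
    items_foldl_insert_option f (PySem.List.dedup (csv_slugs.map Prod.fst)) PySem.Dict.empty
      (PySem.List.nodup_dedup _) (by simp [PySem.Dict.keys_empty])]
  have hemp : (PySem.Dict.empty : PySem.Dict String String).items = [] := rfl
  rw [hemp, List.nil_append]
  apply List.filterMap_congr
  intro c _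
  rw [hres]
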